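-- pv_equiv track=rewrite | github.com/arindhimar/BluePineapple | Python Programs/20-01-26/218.py | min_operations_to_equal
-- ===== SOURCE A (Python) =====
-- def min_operations_to_equal(a, b):
--     operations = 0
--     while a != b:
--         if a > b:
--             a -= 1
--         else:
--             b -= 1
--         operations += 1
--     return operations
-- ===== SOURCE B (Python) =====
-- def min_operations_to_equal(a, b):
--     return abs(a - b)
-- ===== Notes on version B (the rewrite author's own statement) =====
-- stated objective: faster
-- what changed: Replaced the decrement-until-equal loop with the closed form abs(a-b).
import Mathlib
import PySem

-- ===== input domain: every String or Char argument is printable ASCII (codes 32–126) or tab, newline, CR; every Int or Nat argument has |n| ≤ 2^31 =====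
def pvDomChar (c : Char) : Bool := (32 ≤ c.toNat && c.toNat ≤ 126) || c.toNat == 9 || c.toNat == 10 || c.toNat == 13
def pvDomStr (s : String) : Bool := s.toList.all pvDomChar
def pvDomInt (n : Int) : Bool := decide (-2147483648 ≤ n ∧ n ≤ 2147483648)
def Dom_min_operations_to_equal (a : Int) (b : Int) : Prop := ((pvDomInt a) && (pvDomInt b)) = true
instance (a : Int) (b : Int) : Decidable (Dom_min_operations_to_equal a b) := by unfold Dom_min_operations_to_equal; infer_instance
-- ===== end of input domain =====

-- B replaces A's decrement-one-at-a-time loop by the closed form |a - b| (O(1) instead of O(|a-b|)).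

-- ===== PORT A =====
-- literal port of A's while loop: state (a, b, operations), one decrement per step
def minOpsLoop (a : Int) (b : Int) (operations : Int) : Int :=
  if a ≠ b then
    if a > b then minOpsLoop (a - 1) b (operations + 1)
    else minOpsLoop a (b - 1) (operations + 1)
  else operations
termination_by (a - b).natAbs
decreasing_by
  · omega
  · omega

def min_operations_to_equal (a : Int) (b : Int) : Int :=
  minOpsLoop a b 0

-- ===== PORT B =====
def min_operations_to_equal_alt (a : Int) (b : Int) : Int :=
  |a - b|

-- ===== PRECONDITION & SPEC =====
def Spec_min_operations_to_equal (a : Int) (b : Int) (out : Int) : Prop := out = min_operations_to_equal_alt a b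
instance (a : Int) (b : Int) (out : Int) : Decidable (Spec_min_operations_to_equal a b out) := by unfold Spec_min_operations_to_equal; infer_instance

-- ===== CLAIM (what is proved, stated in full; the proofs are below) =====
def Claim_equal_min_operations_to_equal : Prop := ∀ (a : Int) (b : Int), Dom_min_operations_to_equal a b → Spec_min_operations_to_equal a b (min_operations_to_equal a b)

-- ===== LEMMAS AND PROOFS =====
theorem minOpsLoop_eq (a : Int) (b : Int) (operations : Int) :
    minOpsLoop a b operations = operations + |a - b| := by
  fun_induction minOpsLoop a b operations with
  | case1 a b ops hne hgt ih =>
      rw [ih, abs_of_nonneg (by omega), abs_of_pos (by omega)]; ring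
  | case2 a b ops hne hgt ih =>
      rw [ih, abs_of_nonpos (by omega), abs_of_nonpos (by omega)]; ring
  | case3 a b ops heq => simp at heq; simp [heq]

-- ===== VERDICT (by name: the statement is the Claim_ definition above) =====
theorem min_operations_to_equal_spec : Claim_equal_min_operations_to_equal := by
  intro a b _
  unfold Spec_min_operations_to_equal min_operations_to_equal min_operations_to_equal_alt
  rw [minOpsLoop_eq]; ring
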